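-- pv_equiv track=rewrite | github.com/barium-sulphate/IP-Assignment | IP_Assignment_1/2024492_Q13.py | lucky
-- ===== SOURCE A (Python) =====
-- def lucky(n,k):
--     temp=n
--     odd=0
--     even=0
--     dig=0
--     while temp!=0:
--         if dig%2==0:
--             odd+=temp%10
--         else:
--             even+=temp%10
--         dig+=1
--         temp//=10
--     if even<odd:
--         for _ in range(k):
--             x=n//(10**(dig-1))
--             n=(n%(10**(dig-1)))*10+x
--     return n
-- ===== SOURCE B (Python) =====
-- def lucky(n, k):
--     # collect the digits of n (little-endian), then sum alternating positions
--     # with a swap fold; rotate by k mod d in one closed-form splice instead of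
--     # k single-digit rotations.
--     digits = []
--     t = n
--     while t != 0:
--         digits.append(t % 10)
--         t //= 10
--     odd = even = 0
--     for dgt in reversed(digits):
--         odd, even = dgt + even, odd
--     d = len(digits)
--     if even < odd and k > 0:
--         r = k % d
--         p = 10 ** (d - r)
--         n = n % p * 10 ** r + n // p
--     return n
-- ===== Notes on version B (the rewrite author's own statement) =====
-- stated objective: faster
-- what changed: B replaces A's k single-digit rotation steps by one closed-form splice after reducing k modulo the digit count (the rotation's period), and computes the alternating digit sums by a swap-fold over the collected digit list instead of A's position-parity counter; intended as faster in k — a timing run measured ~950x at the largest size on inputs that rotate (even < odd), and parity (~1x) on inputs where no rotation happens, so the overall measurement is input-dependent (faster:unconfirmed).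
import Mathlib
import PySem

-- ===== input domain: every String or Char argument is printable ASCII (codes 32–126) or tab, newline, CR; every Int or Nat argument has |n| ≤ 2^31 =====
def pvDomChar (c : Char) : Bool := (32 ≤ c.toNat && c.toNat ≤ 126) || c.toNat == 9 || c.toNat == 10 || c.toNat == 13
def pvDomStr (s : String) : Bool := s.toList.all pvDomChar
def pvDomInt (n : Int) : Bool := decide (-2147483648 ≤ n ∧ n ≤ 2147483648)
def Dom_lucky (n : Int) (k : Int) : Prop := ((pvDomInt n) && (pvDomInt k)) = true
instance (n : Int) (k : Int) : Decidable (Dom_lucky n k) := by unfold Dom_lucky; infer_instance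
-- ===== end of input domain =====

-- B: one closed-form splice after reducing k mod the digit count replaces A's k
-- single-digit rotation steps (intended as faster in k; a timing run measured ~950x
-- on inputs that rotate, parity where no rotation occurs); digit sums via a swap-fold.


-- ===== PORT A =====
-- while temp != 0: alternating digit sums and digit count; the fuel n.natAbs + 1 only
-- totalizes the loop — it is exact for every n ≥ 0 (the loop runs ≤ n.natAbs + 1 times there).
def luckyLoopA : Nat → Int → Int → Int → Int → Int × Int × Int
  | 0, _, odd, even, dig => (odd, even, dig)
  | fuel+1, temp, odd, even, dig =>
    if temp ≠ 0 then
      if PySem.Int.mod dig 2 = 0 then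
        luckyLoopA fuel (PySem.Int.floordiv temp 10) (odd + PySem.Int.mod temp 10) even (dig + 1)
      else
        luckyLoopA fuel (PySem.Int.floordiv temp 10) odd (even + PySem.Int.mod temp 10) (dig + 1)
    else (odd, even, dig)

def lucky (n : Int) (k : Int) : Int :=
  let s := luckyLoopA (n.natAbs + 1) n 0 0 0
  let odd := s.1
  let even := s.2.1
  let dig := s.2.2
  if even < odd then
    -- 10 ** (dig - 1): dig ≥ 1 whenever this branch runs (even < odd needs a digit), so .toNat is exact
    (PySem.List.pyRange 0 k 1).foldl
      (fun m _ =>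
        let x := PySem.Int.floordiv m ((10:Int) ^ (dig - 1).toNat)
        PySem.Int.mod m ((10:Int) ^ (dig - 1).toNat) * 10 + x) n
  else n

-- ===== PORT B =====
-- while t != 0: digits.append(t % 10); t //= 10   (same fuel totalization, exact for t ≥ 0)
def luckyDigits : Nat → Int → List Int
  | 0, _ => []
  | fuel+1, t =>
    if t ≠ 0 then PySem.Int.mod t 10 :: luckyDigits fuel (PySem.Int.floordiv t 10)
    else []

def lucky_alt (n : Int) (k : Int) : Int :=
  let digits := luckyDigits (n.natAbs + 1) n
  -- for dgt in reversed(digits): odd, even = dgt + even, odd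
  let oe := digits.reverse.foldl (fun s dgt => (dgt + s.2, s.1)) ((0:Int), (0:Int))
  let d : Int := (digits.length : Int)
  if oe.2 < oe.1 ∧ k > 0 then
    let r := PySem.Int.mod k d
    -- 10 ** (d - r): here 0 ≤ r < d, so .toNat is exact
    let p := (10:Int) ^ (d - r).toNat
    PySem.Int.mod n p * (10:Int) ^ r.toNat + PySem.Int.floordiv n p
  else n

-- ===== PRECONDITION & SPEC =====
-- Pre_ excludes n < 0 only: there Python A never returns (temp //= 10 stalls at -1,
-- so the while loop diverges).
def Pre_lucky (n : Int) (k : Int) : Prop := 0 ≤ n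
instance (n : Int) (k : Int) : Decidable (Pre_lucky n k) := by unfold Pre_lucky; infer_instance
def pvWitness_lucky : Int × Int := (123, 5)
def Spec_lucky (n : Int) (k : Int) (out : Int) : Prop := out = lucky_alt n k
instance (n : Int) (k : Int) (out : Int) : Decidable (Spec_lucky n k out) := by unfold Spec_lucky; infer_instance

-- ===== CLAIM (what is proved, stated in full; the proofs are below) =====
def Claim_equal_lucky : Prop := ∀ (n : Int) (k : Int), Dom_lucky n k → Pre_lucky n k → Spec_lucky n k (lucky n k)

-- ===== LEMMAS AND PROOFS =====

-- alternating sums of a digit list: first component = sum at even indices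
def luckySums (L : List Int) : Int × Int := L.foldr (fun dgt s => (dgt + s.2, s.1)) (0, 0)

-- A's loop equals the digit-list swap-fold (same fuel, so both ports see the same digits)
theorem luckyLoopA_eq (fuel : Nat) : ∀ (t o e dg : Int),
    luckyLoopA fuel t o e dg =
      (if dg % 2 = 0 then
        (o + (luckySums (luckyDigits fuel t)).1, e + (luckySums (luckyDigits fuel t)).2,
          dg + (luckyDigits fuel t).length)
      else
        (o + (luckySums (luckyDigits fuel t)).2, e + (luckySums (luckyDigits fuel t)).1,
          dg + (luckyDigits fuel t).length)) := by
  induction fuel with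
  | zero =>
    intro t o e dg
    simp [luckyLoopA, luckyDigits, luckySums]
  | succ fuel ih =>
    intro t o e dg
    by_cases ht : t = 0
    · subst ht
      simp [luckyLoopA, luckyDigits, luckySums]
    · have hmod : PySem.Int.mod dg 2 = dg % 2 := PySem.Int.mod_eq_emod_of_pos (by norm_num)
      simp only [luckyLoopA, luckyDigits, ht, ne_eq, not_false_iff, if_true, hmod]
      rw [show (luckySums (PySem.Int.mod t 10 :: luckyDigits fuel (PySem.Int.floordiv t 10))) =
          (PySem.Int.mod t 10 + (luckySums (luckyDigits fuel (PySem.Int.floordiv t 10))).2,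
            (luckySums (luckyDigits fuel (PySem.Int.floordiv t 10))).1) from rfl]
      by_cases h2 : dg % 2 = 0
      · have h2' : ¬((dg + 1) % 2 = 0) := by omega
        rw [if_pos h2, ih, if_neg h2', if_pos h2]
        simp only [List.length_cons, Prod.ext_iff]
        all_goals and_intros
        all_goals try push_cast
        all_goals first | rfl | ring
      · have h2' : (dg + 1) % 2 = 0 := by omega
        rw [if_neg h2, ih, if_pos h2', if_neg h2]
        simp only [List.length_cons, Prod.ext_iff]
        all_goals and_intros
        all_goals try push_cast
        all_goals first | rfl | ring

-- with enough fuel, n is below 10 ^ (number of digits)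
theorem luckyDigits_lt (fuel : Nat) : ∀ t : Int, 0 ≤ t → t.toNat < fuel →
    t < (10 : Int) ^ (luckyDigits fuel t).length := by
  induction fuel with
  | zero => intro t ht hf; omega
  | succ fuel ih =>
    intro t ht hf
    by_cases h0 : t = 0
    · subst h0; simp [luckyDigits]
    · have hdiv : PySem.Int.floordiv t 10 = t / 10 :=
        PySem.Int.floordiv_eq_ediv_of_pos (by norm_num)
      have h1 : (0:Int) ≤ t / 10 := by omega
      have h3 : (t / 10).toNat < fuel := by omega
      have hih := ih (t / 10) h1 h3
      simp only [luckyDigits, h0, ne_eq, not_false_iff, if_true, hdiv, List.length_cons]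
      have hmod : t % 10 < 10 := by omega
      have hdm : 10 * (t / 10) + t % 10 = t := by omega
      rw [pow_succ]
      have hih' : t / 10 + 1 ≤ (10:Int) ^ (luckyDigits fuel (t / 10)).length :=
        Int.lt_iff_add_one_le.mp hih
      linarith

-- ---- Nat-level rotation arithmetic ----
def rotN (d r n : Nat) : Nat := n % 10 ^ (d - r) * 10 ^ r + n / 10 ^ (d - r)
def stepN (d m : Nat) : Nat := m % 10 ^ (d - 1) * 10 + m / 10 ^ (d - 1)

theorem rotN_zero {d n : Nat} (h : n < 10 ^ d) : rotN d 0 n = n := by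
  simp [rotN, Nat.mod_eq_of_lt h, Nat.div_eq_of_lt h]

theorem rotN_full (d n : Nat) : rotN d d n = n := by
  simp [rotN, Nat.mod_one]

theorem stepN_rotN {d r n : Nat} (hr : r < d) (h : n < 10 ^ d) :
    stepN d (rotN d r n) = rotN d (r + 1) n := by
  set q : Nat := 10 ^ (d - r - 1) with hq_def
  have hq : 0 < q := pow_pos (by norm_num) _
  have hp : 10 ^ (d - r) = q * 10 := by
    rw [hq_def, ← pow_succ]; congr 1; omega
  have hX : 10 ^ (d - 1) = q * 10 ^ r := by
    rw [hq_def, ← pow_add]; congr 1; omega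
  have hdr1 : d - (r + 1) = d - r - 1 := by omega
  set a : Nat := n / (q * 10) with ha_def
  set b : Nat := n % (q * 10) with hb_def
  set c : Nat := b / q with hc_def
  set e : Nat := b % q with he_def
  have hqt : 0 < q * 10 := by positivity
  have hb : b < q * 10 := Nat.mod_lt _ hqt
  have hlt : n < q * 10 * 10 ^ r := by
    calc n < 10 ^ d := h
      _ = q * 10 * 10 ^ r := by rw [← hp, ← pow_add]; congr 1; omega
  have ha : a < 10 ^ r := Nat.div_lt_of_lt_mul hlt
  have he : e < q := Nat.mod_lt _ hq
  have hbce : b = c * q + e := by rw [hc_def, he_def, Nat.mul_comm, Nat.div_add_mod]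
  have hy : e * 10 ^ r + a < q * 10 ^ r := by
    have h1 : e + 1 ≤ q := he
    have h2 : (e + 1) * 10 ^ r ≤ q * 10 ^ r := Nat.mul_le_mul_right _ h1
    nlinarith
  have hm : rotN d r n = (e * 10 ^ r + a) + c * (q * 10 ^ r) := by
    simp only [rotN, hp, ← ha_def, ← hb_def]
    rw [hbce]; ring
  have hn : n = (a * 10 + c) * q + e := by
    have hdm := Nat.div_add_mod n (q * 10)
    rw [← ha_def, ← hb_def] at hdm
    rw [← hdm, hbce]; ring
  have hndivq : n / q = a * 10 + c := by
    rw [hn, add_comm, Nat.add_mul_div_right _ _ hq, Nat.div_eq_of_lt he, zero_add]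
  have hnmodq : n % q = e := by
    rw [hn, add_comm, Nat.add_mul_mod_self_right, Nat.mod_eq_of_lt he]
  rw [hm]
  simp only [stepN, hX]
  rw [Nat.add_mul_div_right _ _ (by positivity : 0 < q * 10 ^ r),
      Nat.add_mul_mod_self_right, Nat.div_eq_of_lt hy, Nat.mod_eq_of_lt hy, zero_add]
  simp only [rotN, hdr1, ← hq_def, hnmodq, hndivq]
  rw [pow_succ]
  ring

theorem stepN_iter_le {d n : Nat} (h : n < 10 ^ d) :
    ∀ r, r ≤ d → (stepN d)^[r] n = rotN d r n := by
  intro r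
  induction r with
  | zero => intro _; simpa using (rotN_zero h).symm
  | succ r ih =>
    intro hr
    rw [Function.iterate_succ_apply', ih (by omega), stepN_rotN (by omega) h]

theorem stepN_iter_mod {d n : Nat} (hd : 0 < d) (h : n < 10 ^ d) :
    ∀ j, (stepN d)^[j] n = rotN d (j % d) n := by
  intro j
  induction j using Nat.strong_induction_on with
  | _ j ih =>
    by_cases hj : j < d
    · rw [Nat.mod_eq_of_lt hj]; exact stepN_iter_le h j (by omega)
    · have hsplit : j = (j - d) + d := by omega
      rw [hsplit, Function.iterate_add_apply]
      rw [stepN_iter_le h d (le_refl d), rotN_full]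
      rw [ih (j - d) (by omega)]
      congr 1
      rw [Nat.add_mod_right]

-- a foldl that ignores the list elements is function iteration
theorem foldl_ignore_iterate {α β : Type} (f : α → α) :
    ∀ (l : List β) (x : α), l.foldl (fun m _ => f m) x = f^[l.length] x := by
  intro l
  induction l with
  | nil => intro x; rfl
  | cons y t ih => intro x; simp [List.foldl_cons, ih, Function.iterate_succ_apply]

theorem pyRange_len (k : Int) : (PySem.List.pyRange 0 k 1).length = k.toNat := by
  simp [PySem.List.pyRange]; omega

-- the Int step A performs is the Nat step, for nonnegative input
theorem stepInt_eq (D : Nat) (m : Int) (hm : 0 ≤ m) :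
    m % (10:Int) ^ (D - 1) * 10 + m / (10:Int) ^ (D - 1) = ((stepN D m.toNat : Nat) : Int) := by
  rw [show m = ((m.toNat : Nat) : Int) by omega]
  simp only [stepN, Int.toNat_natCast]
  push_cast
  ring

-- the Int closed-form splice B performs is the Nat rotation, for nonnegative input
theorem rotInt_eq (D R : Nat) (m : Int) (hm : 0 ≤ m) :
    m % (10:Int) ^ (D - R) * (10:Int) ^ R + m / (10:Int) ^ (D - R) = ((rotN D R m.toNat : Nat) : Int) := by
  rw [show m = ((m.toNat : Nat) : Int) by omega]
  simp only [rotN, Int.toNat_natCast]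
  push_cast
  ring

-- ===== VERDICT (by name: the statement is the Claim_ definition above) =====
theorem lucky_spec : Claim_equal_lucky := by
  intro n k _ hpre
  have hn0 : (0:Int) ≤ n := hpre
  unfold Spec_lucky
  simp only [lucky, lucky_alt]
  rw [luckyLoopA_eq]
  norm_num
  simp only [luckySums]
  set digits := luckyDigits (n.natAbs + 1) n with hdig
  set S := List.foldr (fun (dgt : Int) (s : Int × Int) => (dgt + s.2, s.1)) ((0:Int), (0:Int)) digits with hS
  by_cases h1 : S.2 < S.1
  · by_cases hk : 0 < k
    · rw [if_pos h1, if_pos ⟨h1, hk⟩]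
      have hD : 1 ≤ digits.length := by
        rcases hdd : digits with _ | ⟨d0, rest⟩
        · exfalso; rw [hS, hdd] at h1; simp at h1
        · simp
      have hlt : n < (10:Int) ^ digits.length :=
        luckyDigits_lt (n.natAbs + 1) n hpre (by omega)
      have hcastpow : ((10 ^ digits.length : Nat) : Int) = (10:Int) ^ digits.length := by
        push_cast; ring
      have hltN : n.toNat < 10 ^ digits.length := by
        rw [← hcastpow] at hlt
        omega
      rw [foldl_ignore_iterate, pyRange_len]
      have hiter : ∀ j : Nat,
          (fun m => m % (10:Int) ^ (digits.length - 1) * 10 +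
            m / (10:Int) ^ (digits.length - 1))^[j] n
          = (((stepN digits.length)^[j] n.toNat : Nat) : Int) := by
        intro j
        induction j with
        | zero =>
          simp
          omega
        | succ j ihj =>
          rw [Function.iterate_succ_apply', Function.iterate_succ_apply', ihj]
          exact stepInt_eq digits.length _ (by positivity)
      rw [hiter k.toNat, stepN_iter_mod (by omega) hltN]
      -- B side
      have hlen : (0:Int) < (digits.length : Int) := by exact_mod_cast hD
      have hr : PySem.Int.mod k (digits.length : Int) = ((k.toNat % digits.length : Nat) : Int) := by
        rw [PySem.Int.mod_eq_emod_of_pos hlen, show k = ((k.toNat : Nat) : Int) by omega]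
        push_cast
        simp
      have hRlt : k.toNat % digits.length < digits.length := Nat.mod_lt _ (by omega)
      rw [hr,
        show ((digits.length : Int) - ((k.toNat % digits.length : Nat) : Int)).toNat
            = digits.length - k.toNat % digits.length by omega,
        show (((k.toNat % digits.length : Nat) : Int)).toNat = k.toNat % digits.length by omega]
      exact (rotInt_eq digits.length (k.toNat % digits.length) n hpre).symm
    · rw [if_pos h1, if_neg (by tauto)]
      have hnil : PySem.List.pyRange 0 k 1 = [] :=
        List.eq_nil_of_length_eq_zero (by rw [pyRange_len]; omega)
      rw [hnil]
      rfl
  · rw [if_neg h1, if_neg (by tauto)]
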